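-- pv_equiv track=rewrite | github.com/Sierraki/Solutions | Leetcode/算法&Algorithm/题库/3638.平衡装运的最大数量.py | maxBalancedShipments
-- ===== SOURCE A (Python) =====
-- from typing import List
--
-- def maxBalancedShipments(weight: List[int]) -> int:
--     pin = 1
--     cnt = 0
--     while pin < len(weight):
--         if weight[pin - 1] > weight[pin]:
--             cnt += 1
--             pin += 2
--         else:
--             pin += 1
--     return cnt
-- ===== SOURCE B (Python) =====
-- from typing import List
--
-- def maxBalancedShipments(weight: List[int]) -> int:
--     cnt = 0
--     mx = None
--     for w in weight:
--         if mx is not None and w < mx: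
--             cnt += 1
--             mx = None
--         elif mx is None:
--             mx = w
--         else:
--             mx = max(mx, w)
--     return cnt
-- ===== Notes on version B (the rewrite author's own statement) =====
-- stated objective: alternative
-- what changed: Replaced the index-based while loop that compares adjacent pairs and jumps the cursor by 2 after a hit with a single for-each pass maintaining (count, running window maximum), closing the window when an element drops below the running max.
import Mathlib
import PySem

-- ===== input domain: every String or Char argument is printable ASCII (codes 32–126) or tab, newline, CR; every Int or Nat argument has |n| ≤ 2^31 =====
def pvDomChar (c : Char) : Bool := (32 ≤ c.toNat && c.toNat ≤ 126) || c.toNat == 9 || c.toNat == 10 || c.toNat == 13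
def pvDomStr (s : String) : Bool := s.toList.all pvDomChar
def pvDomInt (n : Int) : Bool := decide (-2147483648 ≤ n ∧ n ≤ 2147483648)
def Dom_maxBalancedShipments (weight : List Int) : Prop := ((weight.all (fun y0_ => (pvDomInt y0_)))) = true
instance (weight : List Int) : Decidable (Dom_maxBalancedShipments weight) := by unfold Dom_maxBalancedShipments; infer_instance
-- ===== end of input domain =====

-- B replaces A's index-based pair-compare-and-skip-2 while loop by a single for-each
-- pass tracking (count, running window maximum); same return value, no side effects.

-- ===== PORT A =====
-- A's while loop: pin scans from 1; on weight[pin-1] > weight[pin] count and jump 2, else step 1.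
-- Fuel (= number of remaining loop iterations, ≤ length) only makes the recursion structural;
-- with fuel ≥ length - pin it never runs out before the loop condition fails.
def pvLoopA (weight : List Int) : Nat → Nat → Int → Int
  | 0, _, cnt => cnt
  | fuel + 1, pin, cnt =>
    if h : pin < weight.length then
      if weight[pin - 1]'(by omega) > weight[pin] then
        pvLoopA weight fuel (pin + 2) (cnt + 1)
      else
        pvLoopA weight fuel (pin + 1) cnt
    else
      cnt

def maxBalancedShipments (weight : List Int) : Int :=
  pvLoopA weight weight.length 1 0

-- ===== PORT B =====
-- B's loop body: close the window on a drop below the running max, else extend the max.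
def pvStepB (s : Int × Option Int) (w : Int) : Int × Option Int :=
  match s.2 with
  | some m => if w < m then (s.1 + 1, none) else (s.1, some (max m w))
  | none => (s.1, some w)

def maxBalancedShipments_alt (weight : List Int) : Int :=
  (weight.foldl pvStepB (0, none)).1

-- ===== PRECONDITION & SPEC =====
def Spec_maxBalancedShipments (weight : List Int) (out : Int) : Prop := out = maxBalancedShipments_alt weight
instance (weight : List Int) (out : Int) : Decidable (Spec_maxBalancedShipments weight out) := by unfold Spec_maxBalancedShipments; infer_instance

-- ===== CLAIM (what is proved, stated in full; the proofs are below) =====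
def Claim_equal_maxBalancedShipments : Prop := ∀ (weight : List Int), Dom_maxBalancedShipments weight → Spec_maxBalancedShipments weight (maxBalancedShipments weight)

-- ===== LEMMAS AND PROOFS =====

theorem pvLoopA_done (weight : List Int) (fuel pin : Nat) (cnt : Int)
    (h : weight.length ≤ pin) : pvLoopA weight fuel pin cnt = cnt := by
  cases fuel with
  | zero => rfl
  | succ n => rw [pvLoopA]; rw [dif_neg (by omega)]

-- At every comparison point of A, B's pending running maximum equals weight[pin-1].
theorem pvLoopA_eq_foldl (weight : List Int) (fuel pin : Nat) (cnt : Int)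
    (h1 : 1 ≤ pin) (h2 : pin ≤ weight.length) (hf : weight.length ≤ pin + fuel) :
    pvLoopA weight fuel pin cnt =
      ((weight.drop pin).foldl pvStepB (cnt, some (weight[pin - 1]'(by omega)))).1 := by
  induction fuel generalizing pin cnt with
  | zero =>
    have hpin : pin = weight.length := by omega
    rw [pvLoopA_done weight 0 pin cnt (by omega)]
    rw [List.drop_eq_nil_of_le (by omega), List.foldl_nil]
  | succ n ih =>
    rw [pvLoopA]
    by_cases hlt : pin < weight.length
    · rw [dif_pos hlt]
      have hdrop : weight.drop pin = weight[pin] :: weight.drop (pin + 1) :=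
        List.drop_eq_getElem_cons hlt
      rw [hdrop, List.foldl_cons]
      by_cases hcmp : weight[pin - 1]'(by omega) > weight[pin]
      · rw [if_pos hcmp]
        have hstep : pvStepB (cnt, some (weight[pin - 1]'(by omega))) weight[pin]
            = (cnt + 1, none) := by simp [pvStepB, hcmp]
        rw [hstep]
        by_cases hlt2 : pin + 1 < weight.length
        · have hdrop2 : weight.drop (pin + 1) = weight[pin + 1] :: weight.drop (pin + 2) :=
            List.drop_eq_getElem_cons hlt2
          rw [hdrop2, List.foldl_cons]
          have hstep2 : pvStepB ((cnt + 1 : Int), (none : Option Int)) weight[pin + 1]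
              = (cnt + 1, some weight[pin + 1]) := by simp [pvStepB]
          rw [hstep2]
          rw [ih (pin + 2) (cnt + 1) (by omega) (by omega) (by omega)]
          simp only [show pin + 2 - 1 = pin + 1 by omega]
        · rw [List.drop_eq_nil_of_le (by omega), List.foldl_nil]
          rw [pvLoopA_done weight n (pin + 2) (cnt + 1) (by omega)]
      · rw [if_neg hcmp]
        have hstep : pvStepB (cnt, some (weight[pin - 1]'(by omega))) weight[pin]
            = (cnt, some weight[pin]) := by
          simp only [pvStepB]
          rw [if_neg (by omega)]
          rw [show max (weight[pin - 1]'(by omega)) weight[pin] = weight[pin] by omega]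
        rw [hstep]
        rw [ih (pin + 1) cnt (by omega) (by omega) (by omega)]
        simp only [show pin + 1 - 1 = pin by omega]
    · rw [dif_neg hlt]
      rw [List.drop_eq_nil_of_le (by omega), List.foldl_nil]

-- ===== VERDICT (by name: the statement is the Claim_ definition above) =====
theorem maxBalancedShipments_spec : Claim_equal_maxBalancedShipments := by
  intro weight _
  unfold Spec_maxBalancedShipments maxBalancedShipments maxBalancedShipments_alt
  cases weight with
  | nil => rfl
  | cons w0 rest =>
    have h := pvLoopA_eq_foldl (w0 :: rest) (w0 :: rest).length 1 0 (by omega)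
      (by simp) (by omega)
    rw [h]
    simp [pvStepB]
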